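-- pv_equiv track=rewrite | github.com/purple-straw/tds | app/services/data_processors/personnel_processor.py | process_rank_data
-- ===== SOURCE A (Python) =====
-- def process_rank_data(data):
--     """处理职级分布数据"""
--     rank_count = {
--         "P序列": {},
--         "M序列": {},
--         "B序列": {}
--     }
--
--     for person in data:
--         level = person.get('level', '')
--         if not level:
--             continue
--
--         if level.startswith('P'):
--             series = "P序列"
--         elif level.startswith('M'):
--             series = "M序列"
--         elif level.startswith('B'):
--             series = "B序列"
--         else:
--             continue
--
--         rank_count[series][level] = rank_count[series].get(level, 0) + 1
--
--     return rank_count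
-- ===== SOURCE B (Python) =====
-- def process_rank_data(data):
--     """处理职级分布数据"""
--     result = {}
--     for name, prefix in (("P序列", "P"), ("M序列", "M"), ("B序列", "B")):
--         counts = {}
--         for person in data:
--             level = person.get('level', '')
--             if level and level.startswith(prefix):
--                 counts[level] = counts.get(level, 0) + 1
--         result[name] = counts
--     return result
-- ===== Notes on version B (the rewrite author's own statement) =====
-- stated objective: alternative
-- what changed: Transposed the traversal: instead of one pass over data with an if/elif chain dispatching into a dict of dicts, B loops over the three (series, prefix) pairs and makes one filtered counting pass over data per series.
import Mathlib
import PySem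

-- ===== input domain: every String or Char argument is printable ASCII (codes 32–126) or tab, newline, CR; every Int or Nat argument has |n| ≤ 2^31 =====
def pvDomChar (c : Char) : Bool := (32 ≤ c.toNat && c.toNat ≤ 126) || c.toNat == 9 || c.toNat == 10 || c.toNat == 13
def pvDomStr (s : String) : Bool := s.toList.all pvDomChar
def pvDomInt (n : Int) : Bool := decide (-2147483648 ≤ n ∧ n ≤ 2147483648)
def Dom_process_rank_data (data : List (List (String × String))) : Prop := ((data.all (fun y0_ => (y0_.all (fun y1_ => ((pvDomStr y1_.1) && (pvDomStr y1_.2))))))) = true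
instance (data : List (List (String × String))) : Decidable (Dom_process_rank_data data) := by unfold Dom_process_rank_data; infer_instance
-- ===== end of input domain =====

-- B transposes A's single branching pass into one filtered counting pass per series (same cost, different decomposition); equivalence of the returned value is proved below.

-- ===== PORT A =====
-- one pass over data; an if/elif chain picks the series and bumps rank_count[series][level]
def pvStepA (rc : PySem.Dict String (PySem.Dict String Int)) (person : List (String × String)) : PySem.Dict String (PySem.Dict String Int) :=
  let level := (PySem.Dict.mk person).getD "level" ""
  if level = "" then rc
  else if PySem.Str.startswith level "P" then
    rc.modify "P序列" PySem.Dict.empty (fun d => d.insert level (d.getD level 0 + 1))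
  else if PySem.Str.startswith level "M" then
    rc.modify "M序列" PySem.Dict.empty (fun d => d.insert level (d.getD level 0 + 1))
  else if PySem.Str.startswith level "B" then
    rc.modify "B序列" PySem.Dict.empty (fun d => d.insert level (d.getD level 0 + 1))
  else rc

def process_rank_data (data : List (List (String × String))) : List (String × List (String × Int)) :=
  let rank_count : PySem.Dict String (PySem.Dict String Int) :=
    ((PySem.Dict.empty.insert "P序列" PySem.Dict.empty).insert "M序列" PySem.Dict.empty).insert "B序列" PySem.Dict.empty
  ((data.foldl pvStepA rank_count).items.map (fun p => (p.1, p.2.items)))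

-- ===== PORT B =====
-- for each (name, prefix): a fresh counting dict filled by one filtered pass over data
def pvStepB (pre : String) (counts : PySem.Dict String Int) (person : List (String × String)) : PySem.Dict String Int :=
  let level := (PySem.Dict.mk person).getD "level" ""
  if level ≠ "" ∧ PySem.Str.startswith level pre then counts.insert level (counts.getD level 0 + 1) else counts

def pvCount (data : List (List (String × String))) (pre : String) : PySem.Dict String Int :=
  data.foldl (pvStepB pre) PySem.Dict.empty

def process_rank_data_alt (data : List (List (String × String))) : List (String × List (String × Int)) :=
  (([("P序列", "P"), ("M序列", "M"), ("B序列", "B")] : List (String × String)).foldl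
    (fun res sp => res.insert sp.1 (pvCount data sp.2)) PySem.Dict.empty).items.map (fun p => (p.1, p.2.items))

-- ===== PRECONDITION & SPEC =====
def Spec_process_rank_data (data : List (List (String × String))) (out : List (String × List (String × Int))) : Prop := out = process_rank_data_alt data
instance (data : List (List (String × String))) (out : List (String × List (String × Int))) : Decidable (Spec_process_rank_data data out) := by unfold Spec_process_rank_data; infer_instance

-- ===== CLAIM (what is proved, stated in full; the proofs are below) =====
def Claim_equal_process_rank_data : Prop := ∀ (data : List (List (String × String))), Dom_process_rank_data data → Spec_process_rank_data data (process_rank_data data)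

-- ===== LEMMAS AND PROOFS =====

-- A's outer dict always keeps exactly the three series keys, in P, M, B order
def pvMk3 (p m b : PySem.Dict String Int) : PySem.Dict String (PySem.Dict String Int) :=
  ((PySem.Dict.empty.insert "P序列" p).insert "M序列" m).insert "B序列" b

-- a string starting with one single character does not start with a different one
theorem pv_sw_excl' (t : List Char) (c₁ c₂ : Char) (hne : c₁ ≠ c₂)
    (h : PySem.Chars.startswith t [c₁] = true) : PySem.Chars.startswith t [c₂] = false := by
  cases t with
  | nil => simp [PySem.Chars.startswith, List.isPrefixOf] at h
  | cons a t =>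
    simp [PySem.Chars.startswith, List.isPrefixOf] at h ⊢
    subst h; simpa [eq_comm] using hne

theorem pv_modP (p m b : PySem.Dict String Int) (f : PySem.Dict String Int → PySem.Dict String Int) :
    (pvMk3 p m b).modify "P序列" PySem.Dict.empty f = pvMk3 (f p) m b := rfl

theorem pv_modM (p m b : PySem.Dict String Int) (f : PySem.Dict String Int → PySem.Dict String Int) :
    (pvMk3 p m b).modify "M序列" PySem.Dict.empty f = pvMk3 p (f m) b := rfl

theorem pv_modB (p m b : PySem.Dict String Int) (f : PySem.Dict String Int → PySem.Dict String Int) :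
    (pvMk3 p m b).modify "B序列" PySem.Dict.empty f = pvMk3 p m (f b) := rfl

-- one element of data moves the three series dicts independently
theorem pv_step (p m b : PySem.Dict String Int) (person : List (String × String)) :
    pvStepA (pvMk3 p m b) person
    = pvMk3 (pvStepB "P" p person) (pvStepB "M" m person) (pvStepB "B" b person) := by
  simp only [pvStepA, pvStepB]
  set level := (PySem.Dict.mk person).getD "level" "" with hlev
  by_cases hl : level = ""
  · simp [hl]
  · by_cases hP : PySem.Chars.startswith level.toList ['P'] = true
    · have hM := pv_sw_excl' level.toList 'P' 'M' (by decide) hP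
      have hB := pv_sw_excl' level.toList 'P' 'B' (by decide) hP
      simp [hl, hP, hM, hB, pv_modP]
      try rfl
    · by_cases hM : PySem.Chars.startswith level.toList ['M'] = true
      · have hB := pv_sw_excl' level.toList 'M' 'B' (by decide) hM
        simp [hl, hP, hM, hB, pv_modM]
        try rfl
      · by_cases hB : PySem.Chars.startswith level.toList ['B'] = true
        · simp [hl, hP, hM, hB, pv_modB]
          try rfl
        · simp [hl, hP, hM, hB]

-- the whole fold transposes into three independent per-series folds
theorem pv_fold (data : List (List (String × String))) :
    ∀ p m b : PySem.Dict String Int,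
      data.foldl pvStepA (pvMk3 p m b)
      = pvMk3 (data.foldl (pvStepB "P") p) (data.foldl (pvStepB "M") m) (data.foldl (pvStepB "B") b) := by
  induction data with
  | nil => intro p m b; rfl
  | cons person rest ih =>
    intro p m b
    simp only [List.foldl_cons, pv_step]
    exact ih _ _ _

theorem pv_main (data : List (List (String × String))) :
    process_rank_data data = process_rank_data_alt data := by
  show ((data.foldl pvStepA (pvMk3 PySem.Dict.empty PySem.Dict.empty PySem.Dict.empty)).items.map
          (fun p => (p.1, p.2.items))) = process_rank_data_alt data
  rw [pv_fold]
  rfl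

-- ===== VERDICT (by name: the statement is the Claim_ definition above) =====
theorem process_rank_data_spec : Claim_equal_process_rank_data := by
  intro data _
  unfold Spec_process_rank_data
  exact pv_main data
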